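-- pv_equiv track=rewrite | github.com/wadansyaku/band-part-key-app | core/measure_based_extractor.py | _group_chord_by_y
-- ===== SOURCE A (Python) =====
-- def _group_chord_by_y(chord_by_y):
--     """近いY座標のコードをグループ化"""
--     grouped = {}
--     threshold = 5  # Y座標の闾値
--
--     for y, chords in sorted(chord_by_y.items()):
--         found_group = False
--         for group_y in grouped:
--             if abs(y - group_y) <= threshold:
--                 grouped[group_y].extend(chords)
--                 found_group = True
--                 break
--
--         if not found_group:
--             grouped[y] = chords
--
--     return grouped
-- ===== SOURCE B (Python) =====
-- def _group_chord_by_y(chord_by_y):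
--     """近いY座標のコードをグループ化 (single pass over the sorted items:
--     only the most recently opened group can be within threshold)."""
--     items = sorted(chord_by_y.items())
--     if not items:
--         return {}
--     grouped = {}
--     cur_y, cur = items[0][0], list(items[0][1])
--     for y, chords in items[1:]:
--         if y - cur_y <= 5:
--             cur = cur + chords
--         else:
--             grouped[cur_y] = cur
--             cur_y, cur = y, list(chords)
--     grouped[cur_y] = cur
--     return grouped
-- ===== Notes on version B (the rewrite author's own statement) =====
-- stated objective: faster
-- what changed: Instead of scanning all existing group keys for every item (A's inner loop over grouped), B walks the sorted items once keeping only the current group: since group keys are created in increasing order and stay more than threshold apart, only the most recently opened group can match, so the inner scan disappears; the Lean Pre_ additionally excludes association lists with duplicate keys, which do not represent a Python dict (both Pythons take a dict, so duplicates cannot occur at the Python level).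
import Mathlib
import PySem

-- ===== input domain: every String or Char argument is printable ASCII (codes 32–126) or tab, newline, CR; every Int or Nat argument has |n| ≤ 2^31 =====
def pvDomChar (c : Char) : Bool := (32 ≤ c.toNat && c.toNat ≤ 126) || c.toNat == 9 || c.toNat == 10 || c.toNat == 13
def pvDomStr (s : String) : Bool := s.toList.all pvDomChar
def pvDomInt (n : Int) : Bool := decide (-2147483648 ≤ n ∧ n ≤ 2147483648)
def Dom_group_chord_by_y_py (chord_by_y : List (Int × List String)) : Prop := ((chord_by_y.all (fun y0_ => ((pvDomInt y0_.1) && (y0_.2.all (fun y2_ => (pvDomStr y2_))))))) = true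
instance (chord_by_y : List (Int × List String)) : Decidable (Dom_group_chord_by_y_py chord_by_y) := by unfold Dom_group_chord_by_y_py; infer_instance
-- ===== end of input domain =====

-- B replaces A's inner scan over all group keys by a single pass over the sorted items
-- that compares only with the current group (faster); equivalence is about the RETURN value
-- only (the Python A extends the caller's chord lists in place, B does not mutate them).

-- ===== PORT A =====
-- 'for group_y in grouped: if abs(y - group_y) <= threshold: … break' — first matching key
def pvFindGroup (y : Int) : List (Int × List String) → Option Int
  | [] => none
  | (g, _) :: rest => if |y - g| ≤ 5 then some g else pvFindGroup y rest

-- one iteration of A's outer loop: extend the found group, else append a new one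
def pvAStep (grouped : List (Int × List String)) (p : Int × List String) : List (Int × List String) :=
  match pvFindGroup p.1 grouped with
  | some g => grouped.map (fun q => if q.1 = g then (q.1, q.2 ++ p.2) else q)
  | none => grouped ++ [(p.1, p.2)]

-- sorted(chord_by_y.items()) compares tuples; on Pre_ (distinct keys) this is the stable sort by key
def group_chord_by_y_py (chord_by_y : List (Int × List String)) : List (Int × List String) :=
  (PySem.List.sorted chord_by_y (fun p => p.1) false).foldl pvAStep []

-- ===== PORT B =====
-- B's loop over items[1:] carrying the current group (cur_y, cur); flushed groups accumulate in order
def pvBRun (y : Int) (acc : List String) : List (Int × List String) → List (Int × List String)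
  | [] => [(y, acc)]
  | (y', cs) :: rest =>
      if y' - y ≤ 5 then pvBRun y (acc ++ cs) rest else (y, acc) :: pvBRun y' cs rest

def group_chord_by_y_py_alt (chord_by_y : List (Int × List String)) : List (Int × List String) :=
  match PySem.List.sorted chord_by_y (fun p => p.1) false with
  | [] => []
  | (y, cs) :: rest => pvBRun y cs rest

-- ===== PRECONDITION & SPEC =====
-- Pre_ excludes association lists with duplicate keys: the Python parameter is a dict, whose
-- assoc-list representation has distinct keys, so such lists do not represent any Python input.
def Pre_group_chord_by_y_py (chord_by_y : List (Int × List String)) : Prop :=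
  (chord_by_y.map Prod.fst).Nodup
instance (chord_by_y : List (Int × List String)) : Decidable (Pre_group_chord_by_y_py chord_by_y) := by
  unfold Pre_group_chord_by_y_py; infer_instance

def pvWitness_group_chord_by_y_py : (List (Int × List String)) :=
  [(10, ["C", "G"]), (-3, ["Am"]), (14, ["F"])]

def Spec_group_chord_by_y_py (chord_by_y : List (Int × List String)) (out : List (Int × List String)) : Prop := out = group_chord_by_y_py_alt chord_by_y
instance (chord_by_y : List (Int × List String)) (out : List (Int × List String)) : Decidable (Spec_group_chord_by_y_py chord_by_y out) := by unfold Spec_group_chord_by_y_py; infer_instance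

-- ===== CLAIM (what is proved, stated in full; the proofs are below) =====
def Claim_equal_group_chord_by_y_py : Prop := ∀ (chord_by_y : List (Int × List String)), Dom_group_chord_by_y_py chord_by_y → Pre_group_chord_by_y_py chord_by_y → Spec_group_chord_by_y_py chord_by_y (group_chord_by_y_py chord_by_y)

-- ===== LEMMAS AND PROOFS =====

-- keys of already-flushed groups are all far below y: A's scan skips them
lemma pvFindGroup_append_of_far (y : Int) (G t : List (Int × List String))
    (h : ∀ k ∈ G.map Prod.fst, ¬ |y - k| ≤ 5) :
    pvFindGroup y (G ++ t) = pvFindGroup y t := by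
  induction G with
  | nil => rfl
  | cons q G ih =>
      simp only [List.cons_append, pvFindGroup]
      rw [if_neg (h q.1 (by simp))]
      exact ih (fun k hk => h k (by simp [hk]))

-- invariant of A's fold: state = flushed groups G ++ current group (g, acc); all keys in G are
-- more than threshold below g, and the remaining item keys strictly increase above g
lemma pvFoldl_aStep_eq (items : List (Int × List String)) :
    ∀ (G : List (Int × List String)) (g : Int) (acc : List String),
    List.Pairwise (· < ·) (g :: items.map Prod.fst) →
    (∀ k ∈ G.map Prod.fst, g - k > 5) →
    List.foldl pvAStep (G ++ [(g, acc)]) items = G ++ pvBRun g acc items := by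
  induction items with
  | nil => intro G g acc _ _; simp [pvBRun]
  | cons p rest ih =>
      intro G g acc hpw hG
      obtain ⟨y, cs⟩ := p
      have hgy : g < y := by
        have := List.rel_of_pairwise_cons hpw (a' := y) (by simp)
        simpa using this
      have hfar : ∀ k ∈ G.map Prod.fst, ¬ |y - k| ≤ 5 := by
        intro k hk
        have := hG k hk
        rw [abs_of_pos (by omega)]
        omega
      have hfind : pvFindGroup y (G ++ [(g, acc)]) = if |y - g| ≤ 5 then some g else none := by
        rw [pvFindGroup_append_of_far y G _ hfar]; rfl
      simp only [List.foldl_cons, pvAStep, hfind]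
      rw [abs_of_pos (by omega)]
      by_cases h5 : y - g ≤ 5
      · rw [if_pos h5]
        have hmap : (G ++ [(g, acc)]).map (fun q => if q.1 = g then (q.1, q.2 ++ cs) else q)
            = G ++ [(g, acc ++ cs)] := by
          rw [List.map_append]
          congr 1
          · rw [List.map_congr_left (g := fun a => a) ?_]
            · simp
            · intro q hq
              have : g - q.1 > 5 := hG q.1 (List.mem_map_of_mem hq)
              simp only [if_neg (show ¬ q.1 = g by omega)]
          · simp
        show List.foldl pvAStep ((G ++ [(g, acc)]).map (fun q => if q.1 = g then (q.1, q.2 ++ cs) else q)) rest = _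
        rw [hmap, ih G g (acc ++ cs) ?_ hG]
        · simp [pvBRun, h5]
        · have hsub : (g :: rest.map Prod.fst).Sublist (g :: y :: rest.map Prod.fst) := by
            refine List.Sublist.cons₂ g ?_
            exact List.sublist_cons_self y _
          exact hpw.sublist (by simp only [List.map_cons] at hsub ⊢; exact hsub)
      · rw [if_neg h5]
        show List.foldl pvAStep ((G ++ [(g, acc)]) ++ [(y, cs)]) rest = _
        rw [ih (G ++ [(g, acc)]) y cs ?_ ?_]
        · simp [pvBRun, h5, List.append_assoc]
        · exact hpw.sublist (by
            refine List.sublist_cons_self g _ |>.trans ?_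
            simp)
        · intro k hk
          simp only [List.map_append, List.mem_append] at hk
          rcases hk with hk | hk
          · have := hG k hk; omega
          · simp at hk; omega

-- ===== VERDICT (by name: the statement is the Claim_ definition above) =====
theorem group_chord_by_y_py_spec : Claim_equal_group_chord_by_y_py := by
  intro l _ hpre
  unfold Spec_group_chord_by_y_py group_chord_by_y_py group_chord_by_y_py_alt
  have hperm : ((PySem.List.sorted l (fun p => p.1) false).map Prod.fst).Perm (l.map Prod.fst) :=
    (PySem.List.sorted_perm l (fun p => p.1) false).map Prod.fst
  have hnd : ((PySem.List.sorted l (fun p => p.1) false).map Prod.fst).Nodup :=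
    hperm.nodup_iff.mpr hpre
  have hle : (PySem.List.sorted l (fun p => p.1) false).Pairwise (fun a b => a.1 ≤ b.1) :=
    PySem.List.sorted_pairwise l (fun p => p.1)
  have hne : (PySem.List.sorted l (fun p => p.1) false).Pairwise (fun a b => a.1 ≠ b.1) :=
    (List.pairwise_map).mp hnd
  have hlt : ((PySem.List.sorted l (fun p => p.1) false).map Prod.fst).Pairwise (· < ·) := by
    rw [List.pairwise_map]
    exact (hle.and hne).imp (fun h => lt_of_le_of_ne h.1 h.2)
  cases hs : PySem.List.sorted l (fun p => p.1) false with
  | nil => rfl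
  | cons p rest =>
      obtain ⟨y, cs⟩ := p
      rw [hs] at hlt
      have h0 : List.foldl pvAStep [] ((y, cs) :: rest) = List.foldl pvAStep ([] ++ [(y, cs)]) rest := by
        simp [pvAStep, pvFindGroup]
      rw [h0, pvFoldl_aStep_eq rest [] y cs (by simpa using hlt) (by simp)]
      simp
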